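-- pv_equiv track=rewrite | github.com/Mahesh-pareek/fie | fie/core/rules.py | normalize_name_spacing
-- ===== SOURCE A (Python) =====
-- def normalize_name_spacing(s: str) -> str:
--     """
--     Join alphabetic tokens, preserve spacing for anything involving digits.
--     """
--     tokens = s.split()
--
--     # if every token is alphabetic → join everything
--     if all(tok.isalpha() for tok in tokens):
--         return "".join(tokens)
--
--     # otherwise, join only adjacent alphabetic tokens
--     out = []
--     i = 0
--     n = len(tokens)
--
--     while i < n:
--         cur = tokens[i]
--
--         if cur.isalpha():
--             j = i + 1
--             merged = cur
--
--             while j < n and tokens[j].isalpha():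
--                 merged += tokens[j]
--                 j += 1
--
--             out.append(merged)
--             i = j
--         else:
--             out.append(cur)
--             i += 1
--
--     return " ".join(out)
-- ===== SOURCE B (Python) =====
-- def normalize_name_spacing(s: str) -> str:
--     """Single flat pass: decide each inter-token gap pairwise ("" iff both neighbours are alphabetic)."""
--     tokens = s.split()
--     if not tokens:
--         return ""
--     res = tokens[0]
--     prev = tokens[0]
--     for tok in tokens[1:]:
--         res += ("" if prev.isalpha() and tok.isalpha() else " ") + tok
--         prev = tok
--     return res
-- ===== Notes on version B (the rewrite author's own statement) =====
-- stated objective: simpler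
-- what changed: Replaces A's nested while loops that build maximal alphabetic runs (plus the redundant all-alphabetic special case) by a single flat pass that decides each inter-token separator pairwise (empty iff both neighbours are alphabetic).
import Mathlib
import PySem

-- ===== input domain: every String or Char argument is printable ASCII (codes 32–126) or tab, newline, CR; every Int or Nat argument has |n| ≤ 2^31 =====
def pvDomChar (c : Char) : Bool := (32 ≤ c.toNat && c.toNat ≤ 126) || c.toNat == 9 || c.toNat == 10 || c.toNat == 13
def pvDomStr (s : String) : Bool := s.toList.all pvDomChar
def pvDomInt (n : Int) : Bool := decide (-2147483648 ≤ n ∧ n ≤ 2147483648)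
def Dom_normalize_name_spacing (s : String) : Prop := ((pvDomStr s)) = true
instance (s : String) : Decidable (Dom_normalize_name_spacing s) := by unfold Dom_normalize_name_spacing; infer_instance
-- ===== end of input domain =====

-- B replaces A's run-merging nested while loops (plus the all-alpha special case) by one flat
-- pass deciding each inter-token separator pairwise; objective: simpler, same cost.

-- ===== PORT A =====
-- inner while loop: 'while j < n and tokens[j].isalpha(): merged += tokens[j]; j += 1'
def pvInnerA (merged : List Char) (rest : List (List Char)) : List Char × List (List Char) :=
  match rest with
  | [] => (merged, [])
  | t :: ts => if PySem.Chars.strIsalpha t then pvInnerA (merged ++ t) ts else (merged, t :: ts)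

-- the port's termination needs this bound on the inner loop's leftover
theorem pvInnerA_length (rest : List (List Char)) (merged : List Char) :
    (pvInnerA merged rest).2.length ≤ rest.length := by
  induction rest generalizing merged with
  | nil => simp [pvInnerA]
  | cons t ts ih =>
    simp only [pvInnerA]
    split
    · exact Nat.le_succ_of_le (ih _)
    · simp

-- outer while loop over the token list
def pvOuterA (tokens : List (List Char)) : List (List Char) :=
  match tokens with
  | [] => []
  | cur :: rest =>
    if PySem.Chars.strIsalpha cur then
      (pvInnerA cur rest).1 :: pvOuterA (pvInnerA cur rest).2
    else
      cur :: pvOuterA rest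
termination_by tokens.length
decreasing_by
  · have := pvInnerA_length rest cur; simp; omega
  · simp

def normalize_name_spacing (s : String) : String :=
  let tokens := PySem.Chars.split₀ s.toList
  if tokens.all PySem.Chars.strIsalpha then
    String.ofList (PySem.Chars.join [] tokens)
  else
    String.ofList (PySem.Chars.join [' '] (pvOuterA tokens))

-- ===== PORT B =====
-- 'res += ("" if prev.isalpha() and tok.isalpha() else " ") + tok; prev = tok'
def pvStepB (acc : List Char × List Char) (tok : List Char) : List Char × List Char :=
  (acc.1 ++ (if PySem.Chars.strIsalpha acc.2 && PySem.Chars.strIsalpha tok then [] else [' ']) ++ tok, tok)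

def normalize_name_spacing_alt (s : String) : String :=
  match PySem.Chars.split₀ s.toList with
  | [] => ""
  | t :: rest => String.ofList (rest.foldl pvStepB (t, t)).1

-- ===== PRECONDITION & SPEC =====
def Spec_normalize_name_spacing (s : String) (out : String) : Prop := out = normalize_name_spacing_alt s
instance (s : String) (out : String) : Decidable (Spec_normalize_name_spacing s out) := by unfold Spec_normalize_name_spacing; infer_instance

-- ===== CLAIM (what is proved, stated in full; the proofs are below) =====
def Claim_equal_normalize_name_spacing : Prop := ∀ (s : String), Dom_normalize_name_spacing s → Spec_normalize_name_spacing s (normalize_name_spacing s)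

-- ===== LEMMAS AND PROOFS =====

-- the string B's loop appends after the first token: separator-then-token for each later token
def pvSeps (prev : List Char) : List (List Char) → List Char
  | [] => []
  | t :: ts => (if PySem.Chars.strIsalpha prev && PySem.Chars.strIsalpha t then [] else [' ']) ++ t ++ pvSeps t ts

theorem foldl_pvStepB (rest : List (List Char)) (acc prev : List Char) :
    (rest.foldl pvStepB (acc, prev)).1 = acc ++ pvSeps prev rest := by
  induction rest generalizing acc prev with
  | nil => simp [pvSeps]
  | cons t ts ih => simp [pvStepB, pvSeps, ih, List.append_assoc]

theorem pvSeps_congr (p q : List Char) (ts : List (List Char))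
    (h : PySem.Chars.strIsalpha p = PySem.Chars.strIsalpha q) : pvSeps p ts = pvSeps q ts := by
  cases ts with
  | nil => rfl
  | cons t ts => simp [pvSeps, h]

theorem strIsalpha_append (m a : List Char) (hm : PySem.Chars.strIsalpha m = true)
    (ha : PySem.Chars.strIsalpha a = true) : PySem.Chars.strIsalpha (m ++ a) = true := by
  simp only [PySem.Chars.strIsalpha] at *
  rcases m with _ | ⟨c, cs⟩ <;> simp_all

theorem pvOuterA_ne_nil (t : List Char) (ts : List (List Char)) : pvOuterA (t :: ts) ≠ [] := by
  rw [pvOuterA]; split <;> simp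

theorem join_cons_ne_nil (sep m : List Char) (L : List (List Char)) (h : L ≠ []) :
    PySem.Chars.join sep (m :: L) = m ++ sep ++ PySem.Chars.join sep L := by
  cases L with
  | nil => exact absurd rfl h
  | cons x xs => rw [PySem.Chars.join_cons_cons]

-- main invariant: B's flat pass equals " ".join of A's run-merging loop
theorem pvMain : ∀ (n : Nat) (rest : List (List Char)), rest.length ≤ n → ∀ (m : List Char),
    m ++ pvSeps m rest = PySem.Chars.join [' '] (pvOuterA (m :: rest)) := by
  intro n
  induction n with
  | zero =>
    intro rest h m
    have : rest = [] := List.length_eq_zero_iff.mp (Nat.le_zero.mp h)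
    subst this
    rw [pvOuterA]
    split <;> simp [pvSeps, pvInnerA, pvOuterA, PySem.Chars.join_singleton]
  | succ n ih =>
    intro rest h m
    by_cases hm : PySem.Chars.strIsalpha m = true
    · rw [pvOuterA, if_pos hm]
      cases rest with
      | nil => simp [pvSeps, pvInnerA, pvOuterA, PySem.Chars.join_singleton]
      | cons a ts =>
        by_cases ha : PySem.Chars.strIsalpha a = true
        · have hma := strIsalpha_append m a hm ha
          have hts : ts.length ≤ n := by simpa using h
          have := ih ts hts (m ++ a)
          rw [pvOuterA, if_pos hma] at this
          rw [pvInnerA, if_pos ha]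
          rw [← this]
          simp [pvSeps, hm, ha,  
            pvSeps_congr (m ++ a) a ts (by rw [hma, ha])]
        · rw [pvInnerA, if_neg ha]
          have hts : ts.length ≤ n := by simpa using h
          rw [join_cons_ne_nil [' '] m (pvOuterA (a :: ts)) (pvOuterA_ne_nil a ts)]
          rw [← ih ts hts a]
          simp [pvSeps, hm, ha]
    · rw [pvOuterA, if_neg hm]
      cases rest with
      | nil => simp [pvSeps, pvOuterA, PySem.Chars.join_singleton]
      | cons a ts =>
        have hts : ts.length ≤ n := by simpa using h
        rw [join_cons_ne_nil [' '] m (pvOuterA (a :: ts)) (pvOuterA_ne_nil a ts)]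
        rw [← ih ts hts a]
        simp [pvSeps, hm, List.append_assoc]

-- when every token is alphabetic B's separators are all empty, matching "".join
theorem pvAllAlpha : ∀ (rest : List (List Char)) (m : List Char),
    PySem.Chars.strIsalpha m = true → rest.all PySem.Chars.strIsalpha = true →
    m ++ pvSeps m rest = PySem.Chars.join [] (m :: rest) := by
  intro rest
  induction rest with
  | nil => intro m _ _; simp [pvSeps, PySem.Chars.join_singleton]
  | cons a ts ih =>
    intro m hm hall
    have ha : PySem.Chars.strIsalpha a = true := by simp at hall; exact hall.1
    have hts : ts.all PySem.Chars.strIsalpha = true := by simp at hall; simpa using hall.2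
    rw [PySem.Chars.join_cons_cons]
    simp only [pvSeps, hm, ha, Bool.and_self, if_pos]
    rw [← ih a ha hts]
    simp

-- ===== VERDICT (by name: the statement is the Claim_ definition above) =====
theorem normalize_name_spacing_spec : Claim_equal_normalize_name_spacing := by
  intro s _
  unfold Spec_normalize_name_spacing normalize_name_spacing normalize_name_spacing_alt
  cases h : PySem.Chars.split₀ s.toList with
  | nil => rfl
  | cons t rest =>
    simp only [foldl_pvStepB]
    by_cases hall : (t :: rest).all PySem.Chars.strIsalpha = true
    · rw [if_pos hall]
      have ht : PySem.Chars.strIsalpha t = true := by simp at hall; exact hall.1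
      have hrest : rest.all PySem.Chars.strIsalpha = true := by simp at hall; simpa using hall.2
      rw [pvAllAlpha rest t ht hrest]
    · rw [if_neg hall, pvMain rest.length rest le_rfl t]
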